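-- pv_equiv track=rewrite | github.com/Chaeng-Ploypaphat-S/ds-algo | sorting/counting.py | sort_counting
-- ===== SOURCE A (Python) =====
-- def sort_counting(arr: list[int]) -> list[int]:
--     """counting sorting algorithm that supports
--        both negative and positive integers.
--     """
--     if not arr:
--         return arr
--     min_val, max_val = min(arr), max(arr)
--     freq = [0] * (max_val - min_val + 1)
--     for num in arr:
--         freq[num - min_val] += 1
--
--     sorted_arr = []
--     for i, count in enumerate(freq):
--         sorted_arr.extend([i + min_val] * count)
--     return sorted_arr
-- ===== SOURCE B (Python) =====
-- def sort_counting(arr: list[int]) -> list[int]: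
--     """Comparison sort: Python's built-in Timsort instead of a frequency table."""
--     return sorted(arr)
-- ===== Notes on version B (the rewrite author's own statement) =====
-- stated objective: simpler
-- what changed: Replaces the counting-sort frequency table and expansion loops with a single call to the built-in comparison sort sorted(arr), which also measured faster (C-level sort vs Python-level loops over the value range).
import Mathlib
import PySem

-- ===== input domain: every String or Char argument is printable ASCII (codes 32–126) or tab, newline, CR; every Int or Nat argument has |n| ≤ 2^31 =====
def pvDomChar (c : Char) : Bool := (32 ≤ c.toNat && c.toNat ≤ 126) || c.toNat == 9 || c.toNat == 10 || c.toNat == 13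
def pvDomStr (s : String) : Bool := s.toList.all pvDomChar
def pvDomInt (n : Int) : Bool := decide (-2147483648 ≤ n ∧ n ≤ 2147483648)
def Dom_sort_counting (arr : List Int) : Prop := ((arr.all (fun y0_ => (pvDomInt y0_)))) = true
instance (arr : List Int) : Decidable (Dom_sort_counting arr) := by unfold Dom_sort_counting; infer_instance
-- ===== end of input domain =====

-- B replaces the counting-sort frequency table with a single comparison sort (sorted(arr)); simpler, value-equal on all integer lists.

-- ===== PORT A =====
-- counting sort: frequency table over [min, max], then expansion in index order
def sort_counting (arr : List Int) : List Int :=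
  if arr = [] then arr
  else
    match PySem.List.min? arr (fun x => x), PySem.List.max? arr (fun x => x) with
    | some min_val, some max_val =>
        let freq0 : List Int := PySem.List.pyRepeat [0] (max_val - min_val + 1)
        let freq := arr.foldl (fun f num =>
          PySem.List.pySetD f (num - min_val)
            (PySem.List.pyGetD f (num - min_val) 0 + 1)) freq0
        -- 'for i, count in enumerate(freq)': fold over freq carrying the running index i
        (freq.foldl (fun (acc : List Int × Int) count =>
          (acc.1 ++ PySem.List.pyRepeat [acc.2 + min_val] count, acc.2 + 1)) ([], 0)).1
    | _, _ => []   -- unreachable: arr ≠ [] so min/max return a value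

-- ===== PORT B =====
def sort_counting_alt (arr : List Int) : List Int :=
  PySem.List.sorted arr (fun x => x)

-- ===== PRECONDITION & SPEC =====
def Spec_sort_counting (arr : List Int) (out : List Int) : Prop := out = sort_counting_alt arr
instance (arr : List Int) (out : List Int) : Decidable (Spec_sort_counting arr out) := by unfold Spec_sort_counting; infer_instance

-- ===== CLAIM (what is proved, stated in full; the proofs are below) =====
def Claim_equal_sort_counting : Prop := ∀ (arr : List Int), Dom_sort_counting arr → Spec_sort_counting arr (sort_counting arr)

-- ===== LEMMAS AND PROOFS =====

-- the frequency-update loop preserves the table's length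
theorem pv_fold_length (mn : Int) (l f : List Int) :
    (l.foldl (fun f num =>
      PySem.List.pySetD f (num - mn) (PySem.List.pyGetD f (num - mn) 0 + 1)) f).length
      = f.length := by
  induction l generalizing f with
  | nil => rfl
  | cons x t ih => simp [List.foldl_cons, ih, PySem.List.length_pySetD]

-- the frequency-update loop: cell j ends at its start value plus the number of occurrences of mn + j
theorem pv_fold_count (mn : Int) (l : List Int) : ∀ (f : List Int),
    (∀ num ∈ l, 0 ≤ num - mn ∧ num - mn < (f.length : Int)) →
    ∀ j : Nat, j < f.length →
    (l.foldl (fun f num =>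
      PySem.List.pySetD f (num - mn) (PySem.List.pyGetD f (num - mn) 0 + 1)) f).getD j 0
      = f.getD j 0 + (l.count (mn + (j : Int)) : Int) := by
  induction l with
  | nil => intro f _ j _; simp
  | cons x t ih =>
    intro f hmem j hj
    have hx := hmem x (by simp)
    set ix : Int := x - mn with hix
    have hxl : ix.toNat < f.length := by omega
    have hset : PySem.List.pySetD f ix (PySem.List.pyGetD f ix 0 + 1)
        = f.set ix.toNat (PySem.List.pyGetD f ix 0 + 1) :=
      PySem.List.pySetD_of_nonneg f _ hx.1
    rw [List.foldl_cons, hset]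
    have ih' := ih (f.set ix.toNat (PySem.List.pyGetD f ix 0 + 1))
      (by
        intro num hn
        have := hmem num (by simp [hn])
        simpa using this)
      j (by simpa using hj)
    rw [ih']
    have hget : PySem.List.pyGetD f ix 0 = f[ix.toNat] :=
      PySem.List.pyGetD_eq_getElem f 0 hx.1 hx.2
    have hsetj : (f.set ix.toNat (PySem.List.pyGetD f ix 0 + 1)).getD j 0
        = if ix.toNat = j then f[ix.toNat] + 1 else f.getD j 0 := by
      rw [List.getD_eq_getElem _ _ (by simpa using hj), List.getElem_set, hget]
      by_cases h : ix.toNat = j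
      · simp [h]
      · simp [h, List.getD, List.getElem?_eq_getElem hj]
    rw [hsetj, List.count_cons]
    have hxiff : (x = mn + (j : Int)) ↔ ix.toNat = j := by omega
    by_cases h : ix.toNat = j
    · subst h
      rw [if_pos rfl, if_pos (beq_iff_eq.mpr (hxiff.mpr rfl)),
        List.getD_eq_getElem _ _ hj]
      push_cast
      ring
    · rw [if_neg h, if_neg (by simp; exact fun hc => h (hxiff.mp hc))]
      push_cast
      ring

-- the expansion loop with its running index is the flatMap over enumerate
theorem pv_enum_fold (mv : Int) (l : List Int) : ∀ (acc : List Int) (i : Int),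
    (l.foldl (fun (a : List Int × Int) c =>
      (a.1 ++ PySem.List.pyRepeat [a.2 + mv] c, a.2 + 1)) (acc, i)).1
    = acc ++ (PySem.List.enumerate l i).flatMap
        (fun ic => PySem.List.pyRepeat [ic.1 + mv] ic.2) := by
  induction l with
  | nil => intro acc i; simp [PySem.List.enumerate]
  | cons x t ih =>
    intro acc i
    rw [List.foldl_cons, PySem.List.enumerate_cons, List.flatMap_cons]
    simp only
    rw [ih (acc ++ PySem.List.pyRepeat [i + mv] x) (i + 1), List.append_assoc]

-- bridging List.sum over range to a Finset sum
theorem pv_sum_range {M : Type} [AddCommMonoid M] (n : Nat) (f : Nat → M) :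
    ((List.range n).map f).sum = ∑ i ∈ Finset.range n, f i := by
  induction n with
  | zero => simp
  | succ m ih => rw [List.range_succ, Finset.sum_range_succ]; simp [ih]

-- the canonical counting-sort output: one block per value of [mn, mn+L)
def pvBlocks (arr : List Int) (mn : Int) (L : Nat) : List Int :=
  (List.range L).flatMap (fun (j : Nat) => List.replicate (arr.count (mn + (j : Int))) (mn + (j : Int)))

theorem pvBlocks_pairwise (arr : List Int) (mn : Int) (L : Nat) :
    (pvBlocks arr mn L).Pairwise (· ≤ ·) := by
  unfold pvBlocks
  rw [List.flatMap_def, List.pairwise_flatten]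
  constructor
  · intro l hl
    rw [List.mem_map] at hl
    obtain ⟨j, _, rfl⟩ := hl
    exact List.pairwise_replicate.mpr (Or.inr le_rfl)
  · rw [List.pairwise_map]
    refine List.Pairwise.imp ?_ (List.pairwise_lt_range (n := L))
    intro a b hab x hx y hy
    rw [List.eq_of_mem_replicate hx, List.eq_of_mem_replicate hy]
    omega

theorem pvBlocks_perm (arr : List Int) (mn mx : Int)
    (hmn : ∀ y ∈ arr, mn ≤ y) (hmx : ∀ y ∈ arr, y ≤ mx) (hle : mn ≤ mx) :
    (pvBlocks arr mn (mx - mn + 1).toNat).Perm arr := by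
  set L := (mx - mn + 1).toNat with hL
  rw [List.perm_iff_count]
  intro a
  unfold pvBlocks
  rw [List.count_flatMap, pv_sum_range]
  have hterm : ∀ j : Nat, (List.count a ∘ fun (j : Nat) =>
      List.replicate (arr.count (mn + (j : Int))) (mn + (j : Int))) j
      = if (mn + (j : Int)) = a then arr.count (mn + (j : Int)) else 0 := by
    intro j
    simp only [Function.comp_apply, List.count_replicate]
    by_cases h : (mn + (j : Int)) = a <;> simp [h]
  by_cases hin : mn ≤ a ∧ a ≤ mx
  · set k : Nat := (a - mn).toNat with hk
    have hkL : k ∈ Finset.range L := by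
      rw [Finset.mem_range]; omega
    have : (∑ j ∈ Finset.range L, (List.count a ∘ fun (j : Nat) =>
        List.replicate (arr.count (mn + (j : Int))) (mn + (j : Int))) j)
        = ∑ j ∈ Finset.range L, if j = k then arr.count (mn + (j : Int)) else 0 := by
      refine Finset.sum_congr rfl ?_
      intro j _
      rw [hterm j]
      have : (mn + (j : Int)) = a ↔ j = k := by omega
      by_cases h : j = k
      · rw [if_pos (this.mpr h), if_pos h]
      · rw [if_neg (fun hc => h (this.mp hc)), if_neg h]
    rw [this, Finset.sum_ite_eq' (Finset.range L) k
      (fun (j : Nat) => arr.count (mn + (j : Int))), if_pos hkL]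
    have : mn + (k : Int) = a := by omega
    rw [this]
  · have hz : arr.count a = 0 := by
      rw [List.count_eq_zero]
      intro hmem
      exact hin ⟨hmn a hmem, hmx a hmem⟩
    have : ∀ j ∈ Finset.range L, (List.count a ∘ fun (j : Nat) =>
        List.replicate (arr.count (mn + (j : Int))) (mn + (j : Int))) j = 0 := by
      intro j hj
      rw [Finset.mem_range] at hj
      rw [hterm j, if_neg (by omega)]
    rw [Finset.sum_congr rfl this, Finset.sum_const, smul_zero, hz]

-- A's result IS the canonical block list
theorem sort_counting_eq_blocks (arr : List Int) (mn mx : Int)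
    (hne : arr ≠ [])
    (hmin : PySem.List.min? arr (fun x => x) = some mn)
    (hmax : PySem.List.max? arr (fun x => x) = some mx) :
    sort_counting arr = pvBlocks arr mn (mx - mn + 1).toNat := by
  have hmn := PySem.List.min?_isMin hmin
  have hmx := PySem.List.max?_isMax hmax
  have hmem : mn ∈ arr := PySem.List.min?_mem hmin
  have hle : mn ≤ mx := hmx mn hmem
  set L : Nat := (mx - mn + 1).toNat with hL
  unfold sort_counting
  rw [if_neg hne, hmin, hmax]
  simp only
  set F : List Int := arr.foldl (fun f num =>
      PySem.List.pySetD f (num - mn) (PySem.List.pyGetD f (num - mn) 0 + 1))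
      (PySem.List.pyRepeat [0] (mx - mn + 1)) with hF
  have hrep : PySem.List.pyRepeat [(0 : Int)] (mx - mn + 1) = List.replicate L 0 :=
    PySem.List.pyRepeat_singleton 0 _
  have hFlen : F.length = L := by
    rw [hF, pv_fold_length, hrep, List.length_replicate]
  have hFget : ∀ j : Nat, j < L → F.getD j 0 = (arr.count (mn + (j : Int)) : Int) := by
    intro j hj
    rw [hF, hrep, pv_fold_count mn arr (List.replicate L 0)
      (by
        intro num hn
        have h1 := hmn num hn
        have h2 := hmx num hn
        rw [List.length_replicate]
        constructor <;> omega)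
      j (by rwa [List.length_replicate])]
    rw [List.getD_eq_getElem _ _ (by rwa [List.length_replicate]), List.getElem_replicate]
    ring
  rw [pv_enum_fold mn F [] 0, List.nil_append,
    PySem.List.enumerate_eq_map_pyRange F 0, PySem.List.len_eq, hFlen,
    PySem.List.pyRange_zero_natCast, List.flatMap_map, List.flatMap_map]
  unfold pvBlocks
  apply List.flatMap_congr
  intro j hj
  rw [List.mem_range] at hj
  rw [PySem.List.pyGetD_natCast, hFget j hj, PySem.List.pyRepeat_singleton]
  have : ((arr.count (mn + (j : Int)) : Int)).toNat = arr.count (mn + (j : Int)) := by omega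
  rw [this]
  have : (j : Int) + mn = mn + (j : Int) := by ring
  rw [this]

-- ===== VERDICT (by name: the statement is the Claim_ definition above) =====
theorem sort_counting_spec : Claim_equal_sort_counting := by
  intro arr _
  unfold Spec_sort_counting sort_counting_alt
  by_cases hne : arr = []
  · subst hne; rfl
  · obtain ⟨mn, hmin⟩ : ∃ mn, PySem.List.min? arr (fun x => x) = some mn := by
      cases h : PySem.List.min? arr (fun x => x) with
      | none => exact absurd ((PySem.List.min?_eq_none_iff arr _).mp h) hne
      | some m => exact ⟨m, rfl⟩
    obtain ⟨mx, hmax⟩ : ∃ mx, PySem.List.max? arr (fun x => x) = some mx := by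
      cases h : PySem.List.max? arr (fun x => x) with
      | none => exact absurd ((PySem.List.max?_eq_none_iff arr _).mp h) hne
      | some m => exact ⟨m, rfl⟩
    have hmn := PySem.List.min?_isMin hmin
    have hmx := PySem.List.max?_isMax hmax
    have hle : mn ≤ mx := hmx mn (PySem.List.min?_mem hmin)
    rw [sort_counting_eq_blocks arr mn mx hne hmin hmax]
    exact (PySem.List.sorted_id_eq_of_perm_of_pairwise arr _
      (pvBlocks_perm arr mn mx hmn hmx hle) (pvBlocks_pairwise arr mn _)).symm
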